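-- pv_equiv track=rewrite | github.com/amar4619/DSA-Solutions | Python/StringInPython.py | first_occurence
-- ===== SOURCE A (Python) =====
-- def first_occurence(str):
--     q =  []
--     s = set()
--     for i in range(len(str)-1,-1,-1):
--         if str[i] not in s  :
--             s.add(str[i])
--             q.append(str[i])
--     return q[len(q)-1]
--
-- str = "valav"
-- ===== SOURCE B (Python) =====
-- def first_occurence(str):
--     # forward scan: return the first character that does not occur again later
--     for i, c in enumerate(str):
--         if c not in str[i + 1:]:
--             return c
-- ===== Notes on version B (the rewrite author's own statement) =====
-- stated objective: simpler
-- what changed: A builds a dedup queue by scanning from the end with a seen-set and returns its last element; B scans forward once and returns the first character that does not occur again in the remaining suffix.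
import Mathlib
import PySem

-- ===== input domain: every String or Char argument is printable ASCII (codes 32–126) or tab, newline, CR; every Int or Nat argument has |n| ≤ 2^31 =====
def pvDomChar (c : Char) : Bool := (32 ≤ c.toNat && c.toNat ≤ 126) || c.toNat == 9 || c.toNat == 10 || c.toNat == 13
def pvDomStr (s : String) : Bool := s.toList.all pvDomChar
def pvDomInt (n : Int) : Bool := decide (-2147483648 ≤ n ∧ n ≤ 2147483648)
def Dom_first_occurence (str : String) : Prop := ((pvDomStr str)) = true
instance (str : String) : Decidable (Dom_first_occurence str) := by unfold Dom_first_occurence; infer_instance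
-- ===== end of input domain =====

-- B replaces A's backward scan with a seen-set and dedup queue by a single forward scan
-- returning the first character that does not occur again in the remaining suffix (simpler).

-- ===== PORT A =====
-- step of A's loop body: 'if str[i] not in s: s.add(str[i]); q.append(str[i])'
def pvStepA (sq : PySem.Set Char × List Char) (c? : Option Char) :
    PySem.Set Char × List Char :=
  match c? with
  | some c =>
      if PySem.Set.contains sq.1 c then sq
      else (PySem.Set.add sq.1 c, sq.2 ++ [c])
  | none => sq  -- unreachable: every index of the range is in bounds

def first_occurence (str : String) : String :=
  let cs := str.toList
  let sq :=
    (PySem.List.pyRange (PySem.List.len cs - 1) (-1) (-1)).foldl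
      (fun sq i => pvStepA sq (PySem.List.pyGet? cs i))
      (PySem.Set.empty, [])
  -- 'return q[len(q)-1]' : IndexError on empty q (excluded by Pre_)
  (PySem.List.pyGet? sq.2 (PySem.List.len sq.2 - 1)).elim "" String.singleton

-- ===== PORT B =====
-- 'for i, c in enumerate(str): if c not in str[i+1:] : return c' — the suffix str[i+1:]
-- is exactly the tail of the list still to be traversed, so the loop is this recursion.
def pvFirstNotInRest : List Char → Option Char
  | [] => none            -- loop falls through: Python returns None (empty input only)
  | c :: rest => if rest.contains c then pvFirstNotInRest rest else some c

def first_occurence_alt (str : String) : String :=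
  (pvFirstNotInRest str.toList).elim "" String.singleton

-- ===== PRECONDITION & SPEC =====
-- Pre_ excludes only the empty string, on which A raises IndexError (q[-1] of empty q).
def Pre_first_occurence (str : String) : Prop := str.toList ≠ []
instance (str : String) : Decidable (Pre_first_occurence str) := by
  unfold Pre_first_occurence; infer_instance

def pvWitness_first_occurence : String := "valav"

def Spec_first_occurence (str : String) (out : String) : Prop := out = first_occurence_alt str
instance (str : String) (out : String) : Decidable (Spec_first_occurence str out) := by
  unfold Spec_first_occurence; infer_instance

-- ===== CLAIM (what is proved, stated in full; the proofs are below) =====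
def Claim_equal_first_occurence : Prop :=
  ∀ (str : String), Dom_first_occurence str → Pre_first_occurence str →
    Spec_first_occurence str (first_occurence str)

-- ===== LEMMAS AND PROOFS =====

-- A's countdown fold over indices of cs is a fold over cs.reverse.
theorem pvFoldA_eq_reverse (cs : List Char) (init : PySem.Set Char × List Char) :
    (PySem.List.pyRange (PySem.List.len cs - 1) (-1) (-1)).foldl
      (fun sq i => pvStepA sq (PySem.List.pyGet? cs i)) init
    = cs.reverse.foldl (fun sq c => pvStepA sq (some c)) init := by
  induction cs using List.reverseRecOn generalizing init with
  | nil => simp [PySem.List.pyRange_neg_one_eq_nil, PySem.List.len]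
  | append_singleton ds c ih =>
      have hlen : PySem.List.len (ds ++ [c]) - 1 = (ds.length : Int) := by
        simp [PySem.List.len_eq]
      rw [hlen, PySem.List.pyRange_neg_one_cons (by omega)]
      rw [List.foldl_cons, List.reverse_append, List.reverse_singleton,
        List.singleton_append, List.foldl_cons]
      have hget : PySem.List.pyGet? (ds ++ [c]) (ds.length : Int) = some c :=
        PySem.List.pyGet?_append_length ds [] c
      rw [hget]
      have hcong :
          (PySem.List.pyRange ((ds.length : Int) - 1) (-1) (-1)).foldl
            (fun sq i => pvStepA sq (PySem.List.pyGet? (ds ++ [c]) i))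
            (pvStepA init (some c))
          = (PySem.List.pyRange ((ds.length : Int) - 1) (-1) (-1)).foldl
            (fun sq i => pvStepA sq (PySem.List.pyGet? ds i))
            (pvStepA init (some c)) := by
        apply PySem.List.foldl_congr_mem
        intro sq i hi
        have hmem := (PySem.List.mem_pyRange_neg_one).1 hi
        have h0 : 0 ≤ i := by omega
        have h1 : i < (ds.length : Int) := by omega
        congr 1
        rw [PySem.List.pyGet?_of_nonneg _ h0, PySem.List.pyGet?_of_nonneg _ h0,
          List.getElem?_append_left (by omega)]
      rw [hcong]
      have := ih (init := pvStepA init (some c))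
      simpa [PySem.List.len_eq] using this

theorem pvInvariant (cs : List Char) :
    (∀ c, PySem.Set.contains ((cs.reverse.foldl (fun sq c => pvStepA sq (some c))
        (PySem.Set.empty, [])).1) c = true ↔ c ∈ cs) ∧
    ((cs.reverse.foldl (fun sq c => pvStepA sq (some c))
        (PySem.Set.empty, [])).2).getLast? = pvFirstNotInRest cs := by
  induction cs with
  | nil => simp [PySem.Set.empty, pvFirstNotInRest]
  | cons x t ih =>
      rw [List.reverse_cons, List.foldl_append, List.foldl_cons, List.foldl_nil]
      set G := t.reverse.foldl (fun sq c => pvStepA sq (some c)) (PySem.Set.empty, []) with hG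
      obtain ⟨ihs, ihq⟩ := ih
      by_cases hx : x ∈ t
      · have hc : PySem.Set.contains G.1 x = true := (ihs x).2 hx
        simp only [pvStepA, hc, if_true]
        constructor
        · intro c
          rw [ihs c, List.mem_cons]
          constructor
          · exact Or.inr
          · rintro (rfl | h) <;> [exact hx; exact h]
        · rw [ihq]
          simp [pvFirstNotInRest, hx]
      · have hc : PySem.Set.contains G.1 x = false := by
          rw [Bool.eq_false_iff]
          intro h; exact hx ((ihs x).1 h)
        simp only [pvStepA, hc, Bool.false_eq_true, if_false]
        constructor
        · intro c
          rw [PySem.Set.contains_iff, PySem.Set.mem_add, ← PySem.Set.contains_iff, ihs c,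
            List.mem_cons]
          tauto
        · rw [List.getLast?_concat]
          simp [pvFirstNotInRest, hx]

-- B's scan always returns a character on a nonempty input.
theorem pvFirstNotInRest_isSome (cs : List Char) (h : cs ≠ []) :
    (pvFirstNotInRest cs).isSome = true := by
  induction cs with
  | nil => exact absurd rfl h
  | cons c rest ih =>
      by_cases hm : c ∈ rest
      · have hrest : rest ≠ [] := by
          intro hnil; simp [hnil] at hm
        simpa [pvFirstNotInRest, hm] using ih hrest
      · simp [pvFirstNotInRest, hm]

-- 'q[len(q)-1]' on a nonempty q is the last element.
theorem pvGet_last (q : List Char) (h : q ≠ []) :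
    PySem.List.pyGet? q (PySem.List.len q - 1) = q.getLast? := by
  have hlen : 0 < q.length := List.length_pos_iff.2 h
  have hcast : PySem.List.len q - 1 = ((q.length - 1 : Nat) : Int) := by
    simp [PySem.List.len_eq]; omega
  rw [hcast, PySem.List.pyGet?_natCast, List.getLast?_eq_getElem?]

-- ===== VERDICT (by name: the statement is the Claim_ definition above) =====
theorem first_occurence_spec : Claim_equal_first_occurence := by
  intro str _ hpre
  unfold Spec_first_occurence
  simp only [first_occurence, first_occurence_alt]
  rw [pvFoldA_eq_reverse]
  obtain ⟨_, hq⟩ := pvInvariant str.toList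
  obtain ⟨c, hc⟩ := Option.isSome_iff_exists.1 (pvFirstNotInRest_isSome str.toList hpre)
  set q := (str.toList.reverse.foldl (fun sq c => pvStepA sq (some c))
    (PySem.Set.empty, [])).2 with hqdef
  have hlast : q.getLast? = some c := by rw [hq, hc]
  have hne : q ≠ [] := by
    intro hnil; rw [hnil] at hlast; simp at hlast
  rw [pvGet_last q hne, hlast, hc]
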